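-- pv_equiv track=rewrite | github.com/format37/avax-pw-crack | p_chain_tools.py | word_to_id
-- ===== SOURCE A (Python) =====
-- def _sum_of_variants_up_to_length(length: int, alphabet_size: int) -> int:
--     """
--     Returns the total count of variants from length=1 up to length=length
--     for an alphabet of given size.
--     """
--     return sum(alphabet_size**i for i in range(1, length + 1))
--
-- def word_to_id(alphabet: str, word: str) -> int:
--     """
--     Returns the 1-based index of the given word among all possible variants
--     that start at length=1, using the provided alphabet.
--     """
--     word_length = len(word)
--     alphabet_size = len(alphabet)
--
--     # Add up all variants that have length less than current word length
--     offset = _sum_of_variants_up_to_length(word_length - 1, alphabet_size)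
--
--     # Compute word's rank among words of its length
--     rank = 0
--     for char in word:
--         char_value = alphabet.index(char)
--         rank = rank * alphabet_size + char_value
--
--     return offset + rank + 1
-- ===== SOURCE B (Python) =====
-- def word_to_id(alphabet: str, word: str) -> int:
--     s = len(alphabet)
--     L = len(word)
--     # first-occurrence index of every alphabet character, built once
--     idx = {}
--     for i, c in enumerate(alphabet):
--         if c not in idx:
--             idx[c] = i
--     # geometric-series closed form for the count of shorter words
--     if L == 0:
--         offset = 0
--     elif s == 1:
--         offset = L - 1
--     else:
--         offset = (s**L - s) // (s - 1)
--     rank = 0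
--     for c in word:
--         rank = rank * s + idx[c]
--     return offset + rank + 1
-- ===== Notes on version B (the rewrite author's own statement) =====
-- stated objective: faster
-- what changed: B replaces the per-character alphabet.index scan with a char->index dict built once, and replaces the power-summing loop for the length offset with the geometric-series closed form (s**L - s)//(s - 1).
import Mathlib
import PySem

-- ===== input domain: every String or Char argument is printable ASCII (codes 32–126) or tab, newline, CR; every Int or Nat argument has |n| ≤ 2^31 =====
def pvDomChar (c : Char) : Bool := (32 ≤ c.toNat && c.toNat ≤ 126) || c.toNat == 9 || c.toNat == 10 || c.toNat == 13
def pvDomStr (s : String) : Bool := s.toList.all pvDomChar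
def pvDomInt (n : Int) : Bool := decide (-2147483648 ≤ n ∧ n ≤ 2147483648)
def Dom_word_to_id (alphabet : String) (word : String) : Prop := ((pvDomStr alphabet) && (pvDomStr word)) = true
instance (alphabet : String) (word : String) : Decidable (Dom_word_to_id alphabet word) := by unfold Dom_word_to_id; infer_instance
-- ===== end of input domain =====

-- B replaces A's per-character alphabet scan with a first-occurrence char->index dict built once,
-- and A's power-summing loop with the geometric-series closed form (s^L - s) // (s - 1); objective: faster.


-- ===== PORT A =====
-- sum(alphabet_size**i for i in range(1, length + 1))
def sumOfVariantsUpToLength (length : Int) (alphabetSize : Int) : Int :=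
  ((PySem.List.pyRange 1 (length + 1) 1).map (fun i => alphabetSize ^ i.toNat)).sum

def word_to_id (alphabet : String) (word : String) : Int :=
  let wordLength : Int := PySem.Str.len word
  let alphabetSize : Int := PySem.Str.len alphabet
  let offset := sumOfVariantsUpToLength (wordLength - 1) alphabetSize
  -- alphabet.index(char): ValueError (= none) excluded by Pre_; getD 0 is never reached inside Pre_
  let rank := word.toList.foldl
    (fun rank ch => rank * alphabetSize + (((PySem.List.index? alphabet.toList ch).getD 0 : Nat) : Int)) 0
  offset + rank + 1

-- ===== PORT B =====
def word_to_id_alt (alphabet : String) (word : String) : Int :=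
  let s : Int := PySem.Str.len alphabet
  let L : Int := PySem.Str.len word
  let idx : PySem.Dict Char Int :=
    (PySem.List.enumerate alphabet.toList 0).foldl
      (fun d p => if d.contains p.2 then d else d.insert p.2 p.1) PySem.Dict.empty
  let offset : Int :=
    if L = 0 then 0
    else if s = 1 then L - 1
    else PySem.Int.floordiv (s ^ L.toNat - s) (s - 1)
  -- idx[c]: KeyError (= none) excluded by Pre_; getD 0 is never reached inside Pre_
  let rank := word.toList.foldl (fun r c => r * s + idx.getD c 0) 0
  offset + rank + 1

-- ===== PRECONDITION & SPEC =====
-- Pre_ excludes exactly the words containing a character absent from the alphabet,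
-- on which A raises ValueError (alphabet.index) and B raises KeyError.
def Pre_word_to_id (alphabet : String) (word : String) : Prop :=
  (word.toList.all (fun c => alphabet.toList.contains c)) = true
instance (alphabet : String) (word : String) : Decidable (Pre_word_to_id alphabet word) := by
  unfold Pre_word_to_id; infer_instance

def pvWitness_word_to_id : String × String := ("abc", "cab")

def Spec_word_to_id (alphabet : String) (word : String) (out : Int) : Prop := out = word_to_id_alt alphabet word
instance (alphabet : String) (word : String) (out : Int) : Decidable (Spec_word_to_id alphabet word out) := by unfold Spec_word_to_id; infer_instance

-- ===== CLAIM (what is proved, stated in full; the proofs are below) =====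
def Claim_equal_word_to_id : Prop := ∀ (alphabet : String) (word : String), Dom_word_to_id alphabet word → Pre_word_to_id alphabet word → Spec_word_to_id alphabet word (word_to_id alphabet word)

-- ===== LEMMAS AND PROOFS =====

-- the geometric sum A computes, as a function of the word length n
def geomSum (n : Nat) (s : Int) : Int :=
  ((PySem.List.pyRange 1 (n : Int) 1).map (fun i => s ^ i.toNat)).sum

theorem geomSum_succ (n : Nat) (hn : 1 ≤ n) (s : Int) :
    geomSum (n + 1) s = geomSum n s + s ^ n := by
  unfold geomSum
  push_cast
  rw [PySem.List.pyRange_one_succ_right (by exact_mod_cast hn)]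
  simp

theorem geomSum_mul (n : Nat) (hn : 1 ≤ n) (s : Int) :
    geomSum n s * (s - 1) = s ^ n - s := by
  induction n with
  | zero => omega
  | succ m ih =>
    rcases Nat.lt_or_ge m 1 with hm | hm
    · interval_cases m
      · simp [geomSum, PySem.List.pyRange]
    · rw [geomSum_succ m hm, add_mul, ih hm]
      ring

theorem geomSum_one (n : Nat) (hn : 1 ≤ n) : geomSum n 1 = (n : Int) - 1 := by
  induction n with
  | zero => omega
  | succ m ih =>
    rcases Nat.lt_or_ge m 1 with hm | hm
    · interval_cases m
      · simp [geomSum, PySem.List.pyRange]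
    · rw [geomSum_succ m hm, ih hm]
      push_cast; ring

-- the dict B builds returns the FIRST index of each character, i.e. index?
theorem buildIdx_get (l : List Char) (k : Int) (d : PySem.Dict Char Int) (c : Char) :
    ((PySem.List.enumerate l k).foldl
        (fun d p => if d.contains p.2 then d else d.insert p.2 p.1) d).get? c
      = if d.contains c then d.get? c
        else (PySem.List.index? l c).map (fun i => k + (i : Int)) := by
  induction l generalizing k d with
  | nil =>
    simp only [PySem.List.enumerate_nil, List.foldl_nil]
    by_cases hd : d.contains c
    · simp [hd]
    · have h2 : d.get? c = none := by
        rw [← Option.not_isSome_iff_eq_none, ← PySem.Dict.contains_eq_isSome_get?]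
        simp [hd]
      simp [hd, h2]
  | cons x xs ih =>
    rw [PySem.List.enumerate_cons]
    simp only [List.foldl_cons]
    by_cases hxc : x = c
    · subst hxc
      rw [PySem.List.index?_cons_self]
      by_cases hd : d.contains x
      · simp [hd, ih]
      · simp only [hd, Bool.false_eq_true, if_false, ih]
        have hcx : (d.insert x k).contains x = true := PySem.Dict.contains_insert_self d x k
        simp [hcx, PySem.Dict.get?_insert_self]
    · rw [PySem.List.index?_cons_of_ne xs hxc]
      by_cases hd : d.contains x
      · simp only [hd, if_true, ih]
        by_cases hdc : d.contains c
        · simp [hdc]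
        · simp only [hdc, Bool.false_eq_true, if_false]
          cases PySem.List.index? xs c with
          | none => simp
          | some i => simp; ring
      · simp only [hd, Bool.false_eq_true, if_false, ih]
        have hc : (d.insert x k).contains c = d.contains c := by
          rw [PySem.Dict.contains_insert]
          simp [Ne.symm hxc]
        rw [hc, PySem.Dict.get?_insert_of_ne d k (Ne.symm hxc)]
        by_cases hdc : d.contains c
        · simp [hdc]
        · simp only [hdc, Bool.false_eq_true, if_false]
          cases PySem.List.index? xs c with
          | none => simp
          | some i => simp; ring

-- ===== VERDICT (by name: the statement is the Claim_ definition above) =====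
theorem word_to_id_spec : Claim_equal_word_to_id := by
  intro alphabet word _ hpre
  unfold Spec_word_to_id word_to_id word_to_id_alt sumOfVariantsUpToLength
  simp only [PySem.Str.len_eq]
  have hrank :
      word.toList.foldl
        (fun rank ch => rank * (alphabet.toList.length : Int) + (((PySem.List.index? alphabet.toList ch).getD 0 : Nat) : Int)) 0
      = word.toList.foldl
        (fun r c => r * (alphabet.toList.length : Int) +
          ((PySem.List.enumerate alphabet.toList 0).foldl
            (fun d p => if d.contains p.2 then d else d.insert p.2 p.1) PySem.Dict.empty).getD c 0) 0 := by
    apply PySem.List.foldl_congr_mem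
    intro acc x hx
    have hmem : x ∈ alphabet.toList := by
      have := List.all_eq_true.mp hpre x hx
      simpa using this
    obtain ⟨i, hi⟩ := Option.isSome_iff_exists.mp ((PySem.List.index?_isSome_iff alphabet.toList x).mpr hmem)
    rw [PySem.Dict.getD_eq_get?_getD, buildIdx_get, hi]
    simp [PySem.Dict.contains_empty]
  rw [hrank]
  congr 1
  congr 1
  -- offsets agree
  have hsum : ((PySem.List.pyRange 1 ((word.toList.length : Int) - 1 + 1) 1).map
      (fun i => (alphabet.toList.length : Int) ^ i.toNat)).sum = geomSum word.toList.length (alphabet.toList.length : Int) := by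
    unfold geomSum; norm_num
  rw [hsum]
  set s : Int := (alphabet.toList.length : Int) with hs
  set n : Nat := word.toList.length with hn
  by_cases h0 : (n : Int) = 0
  · have : n = 0 := by exact_mod_cast h0
    simp [this, geomSum, PySem.List.pyRange]
  · have hn1 : 1 ≤ n := by omega
    simp only [h0, if_false]
    by_cases h1 : s = 1
    · simp [h1, geomSum_one n hn1]
    · simp only [h1, if_false]
      have htoNat : ((n : Int)).toNat = n := by simp
      rw [htoNat, ← geomSum_mul n hn1 s]
      have hne : s - 1 ≠ 0 := by omega
      simp only [PySem.Int.floordiv]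
      exact (Int.mul_fdiv_cancel _ hne).symm
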